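-- pv_equiv track=rewrite | github.com/anshuldishoriya/merito-assignment | main.py | group_by_service
-- ===== SOURCE A (Python) =====
-- def group_by_service(events):
--     # Group events by service name.
--     service_map = {}
--     for event in events:
--         service = event['service']
--         if service not in service_map:
--             service_map[service] = []
--         service_map[service].append(event)
--     return service_map
-- ===== SOURCE B (Python) =====
-- def group_by_service(events):
--     # Group events by service name (index-first-then-filter decomposition).
--     keys = list(dict.fromkeys(e['service'] for e in events))
--     return {s: [e for e in events if e['service'] == s] for s in keys}
-- ===== Notes on version B (the rewrite author's own statement) =====
-- stated objective: alternative
-- what changed: Replaces A's single accumulating pass over a service->list map with an index-first-then-filter shape: one pass collects the distinct service names in first-appearance order, then a dict comprehension builds each group by filtering the event list per service.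
import Mathlib
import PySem

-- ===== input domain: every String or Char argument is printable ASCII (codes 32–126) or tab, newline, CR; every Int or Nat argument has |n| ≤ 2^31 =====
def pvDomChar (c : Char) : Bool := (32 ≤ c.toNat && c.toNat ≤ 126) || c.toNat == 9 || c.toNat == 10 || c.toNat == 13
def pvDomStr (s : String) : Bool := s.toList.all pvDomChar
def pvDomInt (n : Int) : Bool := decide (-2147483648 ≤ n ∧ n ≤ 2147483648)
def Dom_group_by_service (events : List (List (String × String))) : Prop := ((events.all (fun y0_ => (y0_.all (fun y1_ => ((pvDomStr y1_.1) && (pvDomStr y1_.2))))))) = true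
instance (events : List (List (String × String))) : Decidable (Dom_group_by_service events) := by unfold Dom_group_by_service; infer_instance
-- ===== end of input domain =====

-- B rebuilds the grouping as "collect distinct service names first, then one filtering pass per
-- name" instead of A's single accumulating pass into a service->list map; same result on Pre_.

-- event['service']: first matching value (assoc-list lookup). '' stands in where Python raises
-- KeyError — exactly the inputs Pre_group_by_service excludes.
def svcD (e : List (String × String)) : String :=
  (((e.find? (fun p => p.1 == "service")).map (·.2)).getD "")

-- ===== PORT A =====
def group_by_service (events : List (List (String × String))) : List (String × List (List (String × String))) :=
  (events.foldl (fun d event =>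
      let s := svcD event
      let d1 := if d.contains s then d else d.insert s []   -- if service not in service_map: … = []
      d1.insert s (d1.getD s [] ++ [event]))                -- service_map[service].append(event)
    (PySem.Dict.empty : PySem.Dict String (List (List (String × String))))).items

-- ===== PORT B =====
def group_by_service_alt (events : List (List (String × String))) : List (String × List (List (String × String))) :=
  let keys := PySem.List.dedup (events.map svcD)            -- list(dict.fromkeys(e['service'] …))
  keys.map (fun s => (s, events.filter (fun e => svcD e == s)))

-- ===== PRECONDITION & SPEC =====
-- Pre_ excludes exactly the inputs on which Python A raises KeyError: an event without a 'service' key.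
def Pre_group_by_service (events : List (List (String × String))) : Prop :=
  events.all (fun e => e.any (fun p => p.1 == "service")) = true
instance (events : List (List (String × String))) : Decidable (Pre_group_by_service events) := by unfold Pre_group_by_service; infer_instance
def pvWitness_group_by_service : (List (List (String × String))) :=
  [[("service", "db"), ("msg", "x")], [("service", "web")], [("service", "db")]]

def Spec_group_by_service (events : List (List (String × String))) (out : List (String × List (List (String × String)))) : Prop := out = group_by_service_alt events
instance (events : List (List (String × String))) (out : List (String × List (List (String × String)))) : Decidable (Spec_group_by_service events out) := by unfold Spec_group_by_service; infer_instance

-- ===== CLAIM (what is proved, stated in full; the proofs are below) =====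
def Claim_equal_group_by_service : Prop := ∀ (events : List (List (String × String))), Dom_group_by_service events → Pre_group_by_service events → Spec_group_by_service events (group_by_service events)

-- ===== LEMMAS AND PROOFS =====

-- A's loop body is exactly Python's d[k] = d.get(k, []) + [e] at k = svcD e.
theorem body_eq_modify (d : PySem.Dict String (List (List (String × String)))) (e : List (String × String)) :
    (let s := svcD e
     let d1 := if d.contains s then d else d.insert s []
     d1.insert s (d1.getD s [] ++ [e])) = d.modify (svcD e) [] (· ++ [e]) := by
  by_cases h : d.contains (svcD e)
  · simp only [if_pos h]
    exact PySem.Dict.ext_iff.mpr rfl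
  · simp only [if_neg h, PySem.Dict.getD_insert_self, PySem.Dict.insert_insert_self]
    rw [(PySem.Dict.ext_iff.mpr rfl :
      d.modify (svcD e) [] (· ++ [e]) = d.insert (svcD e) (d.getD (svcD e) [] ++ [e]))]
    rw [PySem.Dict.getD_of_not_contains d [] (by simpa using h)]

-- A's fold, rephrased as a modify-fold over (key, event) pairs.
theorem group_fold_eq (events : List (List (String × String))) :
    group_by_service events =
      ((events.map (fun e => (svcD e, e))).foldl
        (fun d p => d.modify p.1 [] (· ++ [p.2]))
        (PySem.Dict.empty : PySem.Dict String (List (List (String × String))))).items := by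
  unfold group_by_service
  rw [List.foldl_map]
  congr 1
  congr 1
  funext d e
  exact body_eq_modify d e

-- ===== VERDICT (by name: the statement is the Claim_ definition above) =====
theorem group_by_service_spec : Claim_equal_group_by_service := by
  intro events _ _
  unfold Spec_group_by_service
  rw [group_fold_eq]
  have hnd : ((events.map (fun e => (svcD e, e))).foldl
        (fun d p => d.modify p.1 [] (· ++ [p.2]))
        (PySem.Dict.empty : PySem.Dict String (List (List (String × String))))).keys.Nodup :=
    PySem.Dict.nodup_keys_foldl_modify_key _ Prod.fst [] (fun _ p => (· ++ [p.2])) _ (by simp)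
  rw [PySem.Dict.items_eq_map_keys _ hnd []]
  rw [PySem.Dict.keys_foldl_modify_key _ Prod.fst [] (fun _ p => (· ++ [p.2]))]
  unfold group_by_service_alt
  simp only [PySem.Dict.keys_empty, PySem.Set.update_nil_left, List.map_map,
    PySem.List.dedup_eq_ofList]
  rw [show (Prod.fst ∘ fun e => (svcD e, e)) = svcD from rfl]
  apply List.map_congr_left
  intro k _
  rw [PySem.Dict.getD_foldl_modify_append]
  simp [List.filter_map, Function.comp_def]
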